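-- pv_equiv track=rewrite | github.com/kangaroo-and-rabbit/karideo | back/tools/sendLocalData.py | extract_and_remove
-- ===== SOURCE A (Python) =====
-- def extract_and_remove(_input_value, _start_mark, _stop_mark):
-- 	values = []
-- 	out = ""
-- 	inside = False
-- 	inside_data = ""
-- 	for it in _input_value:
-- 		if     inside == False \
-- 		   and it == _start_mark:
-- 			inside = True
-- 		elif     inside == True \
-- 		     and it == _stop_mark:
-- 			inside = False
-- 			values.append(inside_data)
-- 			inside_data = ""
-- 		elif inside == True:
-- 			inside_data += it
-- 		else:
-- 			out += it
-- 	return (out, values)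
-- ===== SOURCE B (Python) =====
-- def extract_and_remove(_input_value, _start_mark, _stop_mark):
--     values = []
--     out = []
--     chars = iter(_input_value)
--     for ch in chars:
--         if ch == _start_mark:
--             segment = []
--             for ch in chars:
--                 if ch == _stop_mark:
--                     values.append("".join(segment))
--                     break
--                 segment.append(ch)
--         else:
--             out.append(ch)
--     return ("".join(out), values)
-- ===== Notes on version B (the rewrite author's own statement) =====
-- stated objective: alternative
-- what changed: Replaced the boolean inside-flag state machine with an outer loop over a shared character iterator whose inner loop consumes each marked segment, collecting characters in lists joined once at the end.
import Mathlib
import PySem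

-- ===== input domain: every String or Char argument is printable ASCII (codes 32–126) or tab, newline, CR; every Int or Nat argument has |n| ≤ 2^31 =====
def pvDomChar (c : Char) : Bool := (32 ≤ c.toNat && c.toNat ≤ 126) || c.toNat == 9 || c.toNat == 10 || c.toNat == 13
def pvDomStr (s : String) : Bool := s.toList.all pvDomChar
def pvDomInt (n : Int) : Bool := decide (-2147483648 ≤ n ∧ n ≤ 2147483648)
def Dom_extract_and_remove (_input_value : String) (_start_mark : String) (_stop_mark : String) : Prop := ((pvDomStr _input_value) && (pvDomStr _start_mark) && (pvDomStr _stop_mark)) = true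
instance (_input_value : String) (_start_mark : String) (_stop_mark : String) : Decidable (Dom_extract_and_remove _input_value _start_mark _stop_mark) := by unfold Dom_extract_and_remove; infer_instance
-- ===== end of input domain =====

-- B replaces A's boolean inside-flag state machine with an outer loop over a shared
-- character iterator whose inner loop consumes each marked segment (alternative decomposition).

-- ===== PORT A =====
-- state = (values, out, inside, inside_data); strings carried as List Char
-- (a Python char `it` equals the mark string iff the mark's char list is [it]).
def earStep (s t : List Char) (acc : List (List Char) × List Char × Bool × List Char)
    (c : Char) : List (List Char) × List Char × Bool × List Char :=
  match acc with
  | (values, out, inside, data) =>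
    if inside = false ∧ [c] = s then (values, out, true, data)
    else if inside = true ∧ [c] = t then (values ++ [data], out, false, [])
    else if inside = true then (values, out, inside, data ++ [c])
    else (values, out ++ [c], inside, data)

def extract_and_remove (_input_value : String) (_start_mark : String) (_stop_mark : String) : String × List String :=
  let r := _input_value.toList.foldl (earStep _start_mark.toList _stop_mark.toList) ([], [], false, [])
  (String.ofList r.2.1, r.1.map String.ofList)

-- ===== PORT B =====
-- the two loops of Source B over the shared iterator, as mutual recursion on the
-- remaining characters: bOuter is the outer `for`, bInner the inner `for`
-- (with its `segment` accumulator); each returns (out-tail, values-tail).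
mutual
def bOuter (s t : List Char) : List Char → List Char × List (List Char)
  | [] => ([], [])
  | c :: rest =>
    if [c] = s then bInner s t [] rest
    else
      let r := bOuter s t rest
      (c :: r.1, r.2)

def bInner (s t : List Char) (segment : List Char) : List Char → List Char × List (List Char)
  | [] => ([], [])
  | c :: rest =>
    if [c] = t then
      let r := bOuter s t rest
      (r.1, segment :: r.2)
    else bInner s t (segment ++ [c]) rest
end

def extract_and_remove_alt (_input_value : String) (_start_mark : String) (_stop_mark : String) : String × List String :=
  let r := bOuter _start_mark.toList _stop_mark.toList _input_value.toList
  (String.ofList r.1, r.2.map String.ofList)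

-- ===== PRECONDITION & SPEC =====
def Spec_extract_and_remove (_input_value : String) (_start_mark : String) (_stop_mark : String) (out : String × List String) : Prop := out = extract_and_remove_alt _input_value _start_mark _stop_mark
instance (_input_value : String) (_start_mark : String) (_stop_mark : String) (out : String × List String) : Decidable (Spec_extract_and_remove _input_value _start_mark _stop_mark out) := by unfold Spec_extract_and_remove; infer_instance

-- ===== CLAIM (what is proved, stated in full; the proofs are below) =====
def Claim_equal_extract_and_remove : Prop := ∀ (_input_value : String) (_start_mark : String) (_stop_mark : String), Dom_extract_and_remove _input_value _start_mark _stop_mark → Spec_extract_and_remove _input_value _start_mark _stop_mark (extract_and_remove _input_value _start_mark _stop_mark)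

-- ===== LEMMAS AND PROOFS =====

-- invariant tying A's fold state to B's two loops: in the outside state the rest
-- of the fold behaves like bOuter, in the inside state like bInner on the
-- current inside_data; only the (values, out) projections of the final state matter.
lemma main_lemma (s t : List Char) (l : List Char) :
    (∀ (vs : List (List Char)) (out : List Char),
      (l.foldl (earStep s t) (vs, out, false, [])).1 = vs ++ (bOuter s t l).2 ∧
      (l.foldl (earStep s t) (vs, out, false, [])).2.1 = out ++ (bOuter s t l).1) ∧
    (∀ (vs : List (List Char)) (out d : List Char),
      (l.foldl (earStep s t) (vs, out, true, d)).1 = vs ++ (bInner s t d l).2 ∧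
      (l.foldl (earStep s t) (vs, out, true, d)).2.1 = out ++ (bInner s t d l).1) := by
  induction l with
  | nil => simp [bOuter, bInner]
  | cons c rest ih =>
    constructor
    · intro vs out
      by_cases hs : [c] = s
      · have hstep : earStep s t (vs, out, false, []) c = (vs, out, true, []) := by
          simp [earStep, hs]
        rw [List.foldl_cons, hstep, bOuter, if_pos hs]
        exact ih.2 vs out []
      · have hstep : earStep s t (vs, out, false, []) c = (vs, out ++ [c], false, []) := by
          simp [earStep, hs]
        rw [List.foldl_cons, hstep, bOuter, if_neg hs]
        have h := ih.1 vs (out ++ [c])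
        exact ⟨h.1, by rw [h.2]; simp⟩
    · intro vs out d
      by_cases ht : [c] = t
      · have hstep : earStep s t (vs, out, true, d) c = (vs ++ [d], out, false, []) := by
          simp [earStep, ht]
        rw [List.foldl_cons, hstep, bInner, if_pos ht]
        have h := ih.1 (vs ++ [d]) out
        exact ⟨by rw [h.1]; simp, h.2⟩
      · have hstep : earStep s t (vs, out, true, d) c = (vs, out, true, d ++ [c]) := by
          simp [earStep, ht]
        rw [List.foldl_cons, hstep, bInner, if_neg ht]
        exact ih.2 vs out (d ++ [c])

-- ===== VERDICT (by name: the statement is the Claim_ definition above) =====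
theorem extract_and_remove_spec : Claim_equal_extract_and_remove := by
  intro inp s t _
  unfold Spec_extract_and_remove extract_and_remove extract_and_remove_alt
  have h := (main_lemma s.toList t.toList inp.toList).1 [] []
  simp only at h ⊢
  rw [h.1, h.2]
  simp
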